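-- pv_equiv track=rewrite | github.com/guoyipeng-chi/c-unit-test-workflow | tools/llm_test_generator.py | build_source_context
-- ===== SOURCE A (Python) =====
-- def build_source_context(source_code: str, func_name: str, lines_context: int = 5) -> str:
--     """提取源代码上下文"""
--     lines = source_code.split('\n')
--
--     # 查找函数定义
--     for i, line in enumerate(lines):
--         if f'{func_name}(' in line:
--             # 提取函数定义及其上下文
--             start = max(0, i - lines_context)
--             end = min(len(lines), i + 20)  # 包含函数体
--
--             context = '\n'.join(lines[start:end])
--             return f"Source context:\n```c\n{context}\n```"
--
--     return ""
-- ===== SOURCE B (Python) =====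
-- def build_source_context(source_code: str, func_name: str, lines_context: int = 5) -> str:
--     """提取源代码上下文 (whole-string search instead of a per-line scan)"""
--     needle = f'{func_name}('
--     pos = source_code.find(needle)
--     if pos == -1:
--         return ""
--     i = source_code.count('\n', 0, pos)
--     lines = source_code.split('\n')
--     start = max(0, i - lines_context)
--     end = min(len(lines), i + 20)
--     context = '\n'.join(lines[start:end])
--     return f"Source context:\n```c\n{context}\n```"
-- ===== Notes on version B (the rewrite author's own statement) =====
-- stated objective: alternative
-- what changed: Replaces the enumerate-over-lines scan (substring test on every line) with one whole-string find of the needle, recovering the line index by counting newlines before the match position; splitting into lines happens only on a hit, for slicing.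
-- outside the precondition, e.g. on build_source_context('a\n(z', 'a\n', 5): A returns '', B returns 'Source context:\n```c\na\n(z\n```'
import Mathlib
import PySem

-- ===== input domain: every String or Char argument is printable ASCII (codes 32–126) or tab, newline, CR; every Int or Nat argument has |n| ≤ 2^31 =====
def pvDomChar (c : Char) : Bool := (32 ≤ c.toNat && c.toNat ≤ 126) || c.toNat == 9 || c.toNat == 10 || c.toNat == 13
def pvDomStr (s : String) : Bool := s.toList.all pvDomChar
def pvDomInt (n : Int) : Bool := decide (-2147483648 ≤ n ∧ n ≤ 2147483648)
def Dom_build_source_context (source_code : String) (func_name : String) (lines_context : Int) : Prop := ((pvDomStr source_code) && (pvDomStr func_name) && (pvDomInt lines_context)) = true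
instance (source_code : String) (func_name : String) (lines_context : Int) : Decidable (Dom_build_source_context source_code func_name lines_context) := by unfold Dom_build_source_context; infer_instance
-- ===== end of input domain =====

-- ===== PORT A =====
-- B replaces A's per-line scan with one whole-string find plus a newline count (objective: alternative decomposition).
-- A-side loop: 'for i, line in enumerate(lines): if needle in line: return fmt'
def bscLoop (lines : List (List Char)) (allLines : List (List Char)) (needle : List Char) (lc : Int) (i : Nat) : String :=
  match lines with
  | [] => ""
  | line :: rest =>
    if PySem.Chars.isIn needle line then
      let start := max 0 ((i : Int) - lc)
      let stop := min (PySem.List.len allLines) ((i : Int) + 20)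
      let context := PySem.Chars.join ['\n'] (PySem.List.slice allLines (some start) (some stop))
      String.ofList ("Source context:\n```c\n".toList ++ context ++ "\n```".toList)
    else bscLoop rest allLines needle lc (i + 1)

def build_source_context (source_code : String) (func_name : String) (lines_context : Int) : String :=
  let lines := PySem.Chars.splitOn source_code.toList ['\n']
  bscLoop lines lines (func_name.toList ++ ['(']) lines_context 0

-- ===== PORT B =====
def build_source_context_alt (source_code : String) (func_name : String) (lines_context : Int) : String :=
  let s := source_code.toList
  let needle := func_name.toList ++ ['(']
  let pos := PySem.Chars.find s needle
  if pos == -1 then ""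
  else
    let i := PySem.Chars.count (PySem.List.slice s (some 0) (some pos)) ['\n']  -- source_code.count('\n', 0, pos)
    let lines := PySem.Chars.splitOn s ['\n']
    let start := max 0 ((i : Int) - lines_context)
    let stop := min (PySem.List.len lines) ((i : Int) + 20)
    String.ofList ("Source context:\n```c\n".toList ++ PySem.Chars.join ['\n'] (PySem.List.slice lines (some start) (some stop)) ++ "\n```".toList)

-- ===== PRECONDITION & SPEC =====
-- Pre_ excludes only inputs where func_name contains a newline AND the needle func_name+'(' occurs in source_code:
-- there A's per-line scan can never match the multi-line needle and returns "", while a whole-string search finds it —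
-- a degenerate corner no caller would specify either way.
def Pre_build_source_context (source_code : String) (func_name : String) (lines_context : Int) : Prop :=
  '\n' ∉ func_name.toList
    ∨ PySem.Chars.isIn (func_name.toList ++ ['(']) source_code.toList = false
instance (source_code : String) (func_name : String) (lines_context : Int) : Decidable (Pre_build_source_context source_code func_name lines_context) := by unfold Pre_build_source_context; infer_instance

def pvWitness_build_source_context : String × String × Int := ("x\na(b", "a", 2)

def Spec_build_source_context (source_code : String) (func_name : String) (lines_context : Int) (out : String) : Prop := out = build_source_context_alt source_code func_name lines_context
instance (source_code : String) (func_name : String) (lines_context : Int) (out : String) : Decidable (Spec_build_source_context source_code func_name lines_context out) := by unfold Spec_build_source_context; infer_instance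

-- ===== CLAIM (what is proved, stated in full; the proofs are below) =====
def Claim_equal_build_source_context : Prop := ∀ (source_code : String) (func_name : String) (lines_context : Int), Dom_build_source_context source_code func_name lines_context → Pre_build_source_context source_code func_name lines_context → Spec_build_source_context source_code func_name lines_context (build_source_context source_code func_name lines_context)

-- ===== LEMMAS AND PROOFS =====

-- structural single-newline split, the common reference point of both ports
def pvSplitNl : List Char → List (List Char)
  | [] => [[]]
  | c :: rest =>
    if c = '\n' then [] :: pvSplitNl rest
    else List.modifyHead (c :: ·) (pvSplitNl rest)

theorem pvSplitNl_ne_nil (s : List Char) : pvSplitNl s ≠ [] := by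
  induction s with
  | nil => simp [pvSplitNl]
  | cons c rest ih =>
    simp only [pvSplitNl]
    split_ifs
    · simp
    · cases h : pvSplitNl rest with
      | nil => exact absurd h ih
      | cons a as => simp [List.modifyHead]

theorem splitOn_go_eq (l : List Char) : ∀ (fuel : Nat) (cur : List Char) (acc : List (List Char)),
    l.length < fuel →
    PySem.Chars.splitOn.go ['\n'] fuel l cur acc
      = acc.reverse ++ List.modifyHead (cur.reverse ++ ·) (pvSplitNl l) := by
  induction l with
  | nil =>
    intro fuel cur acc h
    match fuel with
    | f + 1 => simp [PySem.Chars.splitOn.go, pvSplitNl]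
  | cons c rest ih =>
    intro fuel cur acc h
    match fuel with
    | f + 1 =>
      simp only [PySem.Chars.splitOn.go]
      by_cases hc : c = '\n'
      · subst hc
        have hpre : List.isPrefixOf ['\n'] ('\n' :: rest) = true := by simp [List.isPrefixOf]
        rw [if_pos hpre]
        rw [show List.drop ['\n'].length ('\n' :: rest) = rest from rfl]
        rw [ih f [] (cur.reverse :: acc) (by simp at h; omega)]
        simp only [pvSplitNl, if_pos rfl]
        cases hr : pvSplitNl rest with
        | nil => exact absurd hr (pvSplitNl_ne_nil rest)
        | cons a as => simp [List.modifyHead]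
      · have hpre : List.isPrefixOf ['\n'] (c :: rest) = false := by
          simp [List.isPrefixOf]; exact fun hh => absurd hh.symm hc
        rw [if_neg (by simp [hpre])]
        rw [ih f (c :: cur) acc (by simp at h; omega)]
        simp only [pvSplitNl, if_neg hc]
        cases hr : pvSplitNl rest with
        | nil => exact absurd hr (pvSplitNl_ne_nil rest)
        | cons a as => simp [List.modifyHead]

theorem splitOn_eq (s : List Char) : PySem.Chars.splitOn s ['\n'] = pvSplitNl s := by
  rw [PySem.Chars.splitOn, splitOn_go_eq s (s.length + 1) [] [] (by omega)]
  cases h : pvSplitNl s with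
  | nil => exact absurd h (pvSplitNl_ne_nil s)
  | cons a as => simp [List.modifyHead]

theorem count_go_eq (l : List Char) : ∀ (fuel : Nat) (acc : Nat), l.length ≤ fuel →
    PySem.Chars.count.go ['\n'] fuel l acc = acc + l.count '\n' := by
  induction l with
  | nil =>
    intro fuel acc h
    cases fuel <;> simp [PySem.Chars.count.go]
  | cons c rest ih =>
    intro fuel acc h
    match fuel with
    | f + 1 =>
      simp only [PySem.Chars.count.go]
      by_cases hc : c = '\n'
      · subst hc
        rw [if_pos (by simp [List.isPrefixOf])]
        rw [show List.drop ['\n'].length ('\n' :: rest) = rest from rfl]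
        rw [ih f (acc + 1) (by simp at h; omega)]
        simp [List.count_cons]
        omega
      · rw [if_neg (by simp [List.isPrefixOf]; exact fun hh => absurd hh.symm hc)]
        rw [ih f acc (by simp at h; omega)]
        simp [List.count_cons, hc]

theorem count_nl_eq (l : List Char) : PySem.Chars.count l ['\n'] = l.count '\n' := by
  rw [PySem.Chars.count]
  simp [count_go_eq l l.length 0 (le_refl _)]

theorem intercalate_cons_cons' (sep a b : List Char) (as : List (List Char)) :
    List.intercalate sep (a :: b :: as) = a ++ sep ++ List.intercalate sep (b :: as) := by
  simp [List.intercalate, List.intersperse]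

theorem intercalate_pvSplitNl (s : List Char) : List.intercalate ['\n'] (pvSplitNl s) = s := by
  induction s with
  | nil => simp [pvSplitNl, List.intercalate]
  | cons c rest ih =>
    simp only [pvSplitNl]
    split_ifs with hc
    · subst hc
      cases hr : pvSplitNl rest with
      | nil => exact absurd hr (pvSplitNl_ne_nil rest)
      | cons a as =>
        rw [hr] at ih
        rw [intercalate_cons_cons']
        simp [ih]
    · cases hr : pvSplitNl rest with
      | nil => exact absurd hr (pvSplitNl_ne_nil rest)
      | cons a as =>
        rw [hr] at ih
        simp only [List.modifyHead]
        cases as with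
        | nil =>
          simp [List.intercalate] at ih ⊢
          simp [ih]
        | cons b bs =>
          rw [intercalate_cons_cons'] at ih ⊢
          simp [← ih]

theorem not_mem_pvSplitNl (s : List Char) : ∀ l ∈ pvSplitNl s, '\n' ∉ l := by
  induction s with
  | nil => simp [pvSplitNl]
  | cons c rest ih =>
    simp only [pvSplitNl]
    split_ifs with hc
    · intro l hl
      rcases List.mem_cons.mp hl with h | h
      · simp [h]
      · exact ih l h
    · cases hr : pvSplitNl rest with
      | nil => exact absurd hr (pvSplitNl_ne_nil rest)
      | cons a as =>
        rw [hr] at ih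
        intro l hl
        simp only [List.modifyHead] at hl
        rcases List.mem_cons.mp hl with h | h
        · subst h
          intro hm
          rcases List.mem_cons.mp hm with h' | h'
          · exact hc h'.symm
          · exact ih a (by simp) h'
        · exact ih l (by simp [h])

-- prefix-of-append bookkeeping
theorem prefix_append_left' {α : Type} (needle X Y : List α) (h : needle <+: X ++ Y)
    (hlen : needle.length ≤ X.length) : needle <+: X := by
  have := List.prefix_iff_eq_take.mp h
  rw [List.take_append_of_le_length hlen] at this
  rw [this]
  exact List.take_prefix _ _

theorem mem_of_prefix_append_long {α : Type} (needle X Y : List α) (c : α)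
    (h : needle <+: X ++ c :: Y) (hlen : X.length < needle.length) : c ∈ needle := by
  obtain ⟨t, ht⟩ := h
  have h1 : (needle ++ t)[X.length]? = needle[X.length]? := List.getElem?_append_left hlen
  rw [ht] at h1
  have h2 : (X ++ c :: Y)[X.length]? = some c := by
    rw [List.getElem?_append_right (le_refl _)]
    simp
  rw [h2] at h1
  exact List.mem_of_getElem? h1.symm

-- where the needle can start inside 'line ++ newline ++ rest'
theorem occ_iff (needle l s' : List Char) (hn : '\n' ∉ needle) (hl : '\n' ∉ l) (q : Nat) :
    needle <+: (l ++ '\n' :: s').drop q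
      ↔ (q ≤ l.length ∧ needle <+: l.drop q)
        ∨ (l.length + 1 ≤ q ∧ needle <+: s'.drop (q - (l.length + 1))) := by
  by_cases hq : q ≤ l.length
  · rw [List.drop_append_of_le_length hq]
    constructor
    · intro h
      by_cases hlen : needle.length ≤ (l.drop q).length
      · exact Or.inl ⟨hq, prefix_append_left' needle _ _ h hlen⟩
      · exact absurd (mem_of_prefix_append_long needle _ _ '\n' h (by omega)) hn
    · rintro (⟨_, h⟩ | ⟨h1, _⟩)
      · exact h.trans (List.prefix_append _ _)
      · omega
  · have hdrop : (l ++ '\n' :: s').drop q = s'.drop (q - (l.length + 1)) := by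
      have h1 : l ++ '\n' :: s' = (l ++ ['\n']) ++ s' := by simp
      have h2 : q = (l ++ ['\n']).length + (q - (l.length + 1)) := by simp; omega
      rw [h1, h2, List.drop_append]
      rw [List.drop_eq_nil_of_le (by simp)]
      simp
    rw [hdrop]
    constructor
    · intro h
      exact Or.inr ⟨by omega, h⟩
    · rintro (⟨h1, _⟩ | ⟨_, h⟩)
      · omega
      · exact h

theorem exists_prefix_drop_iff_infix (needle s : List Char) :
    (∃ j, needle <+: s.drop j) ↔ needle <:+: s := by
  rw [PySem.Chars.exists_prefix_drop_iff_isIn]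
  exact PySem.Chars.isIn_iff_infix needle s

theorem find_eq_of (s needle : List Char) (p : Nat) (hp : needle <+: s.drop p)
    (hmin : ∀ q < p, ¬ needle <+: s.drop q) : PySem.Chars.find s needle = (p : Int) := by
  have hinf : needle <:+: s := (exists_prefix_drop_iff_infix needle s).mp ⟨p, hp⟩
  have h0 : 0 ≤ PySem.Chars.find s needle := (PySem.Chars.find_nonneg_iff s needle).mpr hinf
  obtain ⟨h1, h2⟩ := PySem.Chars.find_spec h0
  rcases lt_trichotomy (PySem.Chars.find s needle).toNat p with hlt | heq | hgt
  · exact absurd h1 (hmin _ hlt)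
  · omega
  · exact absurd hp (h2 p hgt)

-- the key lemma: the first line containing the needle vs. whole-string find + newline count
theorem key (needle : List Char) (hn : '\n' ∉ needle) (hne : needle ≠ []) :
    ∀ lines : List (List Char), (∀ l ∈ lines, '\n' ∉ l) →
    (match List.findIdx? (fun l => PySem.Chars.isIn needle l) lines with
     | none => PySem.Chars.find (List.intercalate ['\n'] lines) needle = -1
     | some i => ∃ p : Nat, PySem.Chars.find (List.intercalate ['\n'] lines) needle = (p : Int)
          ∧ ((List.intercalate ['\n'] lines).take p).count '\n' = i) := by
  intro lines
  induction lines with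
  | nil =>
    intro _
    simp only [List.findIdx?_nil]
    rw [PySem.Chars.find_eq_neg_one_iff]
    simp [List.intercalate]
    intro h
    exact hne h
  | cons l rest ih =>
    intro hmem
    have hl : '\n' ∉ l := hmem l (by simp)
    have hrest : ∀ x ∈ rest, '\n' ∉ x := fun x hx => hmem x (by simp [hx])
    cases rest with
    | nil =>
      rw [List.findIdx?_cons]
      have hint : List.intercalate ['\n'] [l] = l := by simp [List.intercalate]
      rw [hint]
      by_cases hil : PySem.Chars.isIn needle l = true
      · rw [if_pos hil]
        have hinfix : needle <:+: l := (PySem.Chars.isIn_iff_infix needle l).mp hil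
        have h0 : 0 ≤ PySem.Chars.find l needle := (PySem.Chars.find_nonneg_iff l needle).mpr hinfix
        refine ⟨(PySem.Chars.find l needle).toNat, (Int.toNat_of_nonneg h0).symm, ?_⟩
        have hle : (l.take (PySem.Chars.find l needle).toNat).count '\n' ≤ l.count '\n' :=
          (List.take_sublist _ _).count_le _
        have hz : l.count '\n' = 0 := List.count_eq_zero.mpr hl
        omega
      · rw [if_neg hil]
        simp only [List.findIdx?_nil, Option.map_none]
        rw [PySem.Chars.find_eq_neg_one_iff]
        exact fun h => hil ((PySem.Chars.isIn_iff_infix needle l).mpr h)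
    | cons m rest' =>
      have hint : List.intercalate ['\n'] (l :: m :: rest')
          = l ++ '\n' :: List.intercalate ['\n'] (m :: rest') := by
        rw [intercalate_cons_cons']
        simp
      set s' := List.intercalate ['\n'] (m :: rest') with hs'
      rw [List.findIdx?_cons, hint]
      by_cases hil : PySem.Chars.isIn needle l = true
      · rw [if_pos hil]
        have hinfix : needle <:+: l := (PySem.Chars.isIn_iff_infix needle l).mp hil
        have h0 : 0 ≤ PySem.Chars.find l needle := (PySem.Chars.find_nonneg_iff l needle).mpr hinfix
        set p := (PySem.Chars.find l needle).toNat with hp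
        have hpl : p ≤ l.length := by
          have := PySem.Chars.find_le_length l needle
          omega
        obtain ⟨hpre, hmin⟩ := PySem.Chars.find_spec h0
        refine ⟨p, ?_, ?_⟩
        · apply find_eq_of
          · rw [List.drop_append_of_le_length hpl]
            exact hpre.trans (List.prefix_append _ _)
          · intro q hq hqpre
            rcases (occ_iff needle l s' hn hl q).mp hqpre with ⟨_, h2⟩ | ⟨h1, _⟩
            · exact hmin q hq h2
            · omega
        · rw [List.take_append_of_le_length hpl]
          have hle : (l.take p).count '\n' ≤ l.count '\n' := (List.take_sublist _ _).count_le _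
          have hz : l.count '\n' = 0 := List.count_eq_zero.mpr hl
          omega
      · rw [if_neg hil]
        have hnotocc_l : ∀ q, ¬ needle <+: l.drop q := by
          intro q hq
          exact hil ((PySem.Chars.exists_prefix_drop_iff_isIn needle l).mp ⟨q, hq⟩)
        have ih' := ih hrest
        cases hidx : List.findIdx? (fun x => PySem.Chars.isIn needle x) (m :: rest') with
        | none =>
          rw [hidx] at ih'
          simp only [Option.map_none]
          rw [PySem.Chars.find_eq_neg_one_iff]
          intro hinf
          obtain ⟨q, hq⟩ := (exists_prefix_drop_iff_infix needle _).mpr hinf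
          rcases (occ_iff needle l s' hn hl q).mp hq with ⟨_, h2⟩ | ⟨_, h2⟩
          · exact hnotocc_l _ h2
          · have hns' : ¬ needle <:+: s' := (PySem.Chars.find_eq_neg_one_iff s' needle).mp ih'
            exact hns' ((exists_prefix_drop_iff_infix needle s').mp ⟨_, h2⟩)
        | some j =>
          rw [hidx] at ih'
          obtain ⟨p', hfind', hcount'⟩ := ih'
          simp only [Option.map_some]
          have h0' : 0 ≤ PySem.Chars.find s' needle := by rw [hfind']; positivity
          obtain ⟨hpre', hmin'⟩ := PySem.Chars.find_spec h0'
          have hps : (PySem.Chars.find s' needle).toNat = p' := by rw [hfind']; simp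
          rw [hps] at hpre' hmin'
          refine ⟨l.length + 1 + p', ?_, ?_⟩
          · apply find_eq_of
            · apply (occ_iff needle l s' hn hl _).mpr
              refine Or.inr ⟨by omega, ?_⟩
              have : l.length + 1 + p' - (l.length + 1) = p' := by omega
              rw [this]
              exact hpre'
            · intro q hq hqpre
              rcases (occ_iff needle l s' hn hl q).mp hqpre with ⟨_, h2⟩ | ⟨hq1, h2⟩
              · exact hnotocc_l _ h2
              · exact hmin' (q - (l.length + 1)) (by omega) h2
          · have htake : (l ++ '\n' :: s').take (l.length + 1 + p') = l ++ '\n' :: s'.take p' := by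
              have h1 : l ++ '\n' :: s' = (l ++ ['\n']) ++ s' := by simp
              have h2 : l.length + 1 + p' = (l ++ ['\n']).length + p' := by simp
              rw [h1, h2, List.take_append]
              rw [List.take_of_length_le (by simp)]
              simp
            rw [htake]
            have hz : l.count '\n' = 0 := List.count_eq_zero.mpr hl
            simp [List.count_append, hz, hcount']

theorem bscLoop_eq (needle : List Char) (all : List (List Char)) (lc : Int) :
    ∀ (lines : List (List Char)) (i0 : Nat),
    bscLoop lines all needle lc i0
      = match List.findIdx? (fun l => PySem.Chars.isIn needle l) lines with
        | none => ""
        | some j =>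
          String.ofList ("Source context:\n```c\n".toList
            ++ PySem.Chars.join ['\n'] (PySem.List.slice all
                 (some (max 0 ((((i0 + j) : Nat) : Int) - lc)))
                 (some (min (PySem.List.len all) ((((i0 + j) : Nat) : Int) + 20))))
            ++ "\n```".toList) := by
  intro lines
  induction lines with
  | nil => intro i0; simp [bscLoop]
  | cons line rest ih =>
    intro i0
    rw [List.findIdx?_cons]
    by_cases hil : PySem.Chars.isIn needle line = true
    · rw [if_pos hil]
      simp only [bscLoop, hil, if_pos]
      simp
    · rw [if_neg hil]
      simp only [bscLoop, hil]
      rw [if_neg (by simp [hil])]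
      rw [ih (i0 + 1)]
      cases hidx : List.findIdx? (fun l => PySem.Chars.isIn needle l) rest with
      | none => simp
      | some j =>
        simp only [Option.map_some]
        have : i0 + 1 + j = i0 + (j + 1) := by omega
        rw [this]

theorem mem_intercalate_infix (sep : List Char) : ∀ (L : List (List Char)) (l : List Char),
    l ∈ L → l <:+: List.intercalate sep L := by
  intro L
  induction L with
  | nil => simp
  | cons a as ih =>
    intro l hl
    rcases List.mem_cons.mp hl with h | h
    · subst h
      cases as with
      | nil => simp [List.intercalate]
      | cons b bs =>
        rw [intercalate_cons_cons']
        exact ((List.prefix_append _ _).trans (List.prefix_append _ _)).isInfix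
    · cases as with
      | nil => simp at h
      | cons b bs =>
        rw [intercalate_cons_cons']
        exact (ih l h).trans (List.suffix_append _ _).isInfix

-- ===== VERDICT (by name: the statement is the Claim_ definition above) =====
theorem build_source_context_spec : Claim_equal_build_source_context := by
  intro source_code func_name lines_context _ hpre
  unfold Spec_build_source_context
  unfold Pre_build_source_context at hpre
  simp only [build_source_context, build_source_context_alt]
  set s := source_code.toList
  set needle := func_name.toList ++ ['('] with hneedle
  by_cases hnl : '\n' ∈ func_name.toList
  · -- func_name has a newline: Pre_ guarantees the needle is absent, both sides return ""
    have hnotin : PySem.Chars.isIn needle s = false := by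
      rcases hpre with h | h
      · exact absurd hnl h
      · exact h
    have hfind : PySem.Chars.find s needle = -1 :=
      (PySem.Chars.find_eq_neg_one_iff s needle).mpr
        ((PySem.Chars.isIn_eq_false_iff needle s).mp hnotin)
    rw [splitOn_eq, bscLoop_eq, hfind]
    have hidx : List.findIdx? (fun l => PySem.Chars.isIn needle l) (pvSplitNl s) = none := by
      rw [List.findIdx?_eq_none_iff]
      intro x hx
      by_contra hxin
      have h1 : needle <:+: x := (PySem.Chars.isIn_iff_infix needle x).mp (by
        simpa using hxin)
      have h2 : x <:+: s := by
        have := mem_intercalate_infix ['\n'] (pvSplitNl s) x hx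
        rwa [intercalate_pvSplitNl s] at this
      exact ((PySem.Chars.isIn_eq_false_iff needle s).mp hnotin) (h1.trans h2)
    rw [hidx]
    simp
  · have hn : '\n' ∉ needle := by
      rw [hneedle]
      intro h
      rcases List.mem_append.mp h with h | h
      · exact hnl h
      · simp at h
    have hne : needle ≠ [] := by rw [hneedle]; simp
    rw [splitOn_eq]
    have hkey := key needle hn hne (pvSplitNl s) (not_mem_pvSplitNl s)
    rw [intercalate_pvSplitNl s] at hkey
    rw [bscLoop_eq]
    cases hidx : List.findIdx? (fun l => PySem.Chars.isIn needle l) (pvSplitNl s) with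
    | none =>
      rw [hidx] at hkey
      simp [hkey]
    | some j =>
      rw [hidx] at hkey
      obtain ⟨p, hfind, hcount⟩ := hkey
      rw [hfind]
      rw [if_neg (by simp)]
      rw [PySem.List.slice_zero_start, PySem.List.slice_to_natCast]
      rw [count_nl_eq, hcount]
      simp
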